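/- GENERATED by mk_final_copies.py from the proof of the farm's unit `start_decoder.C15` (farm:start_decoder.C15.2: Proof.lean) as the
   re-elaboration sweep compiled it — do not edit. -/
import Vorbis.Spec.Units.start_decoder_C15
import Vorbis.Spec.Worked.start_decoder_C15_Lemmas

open X86 X86.User Asan Vorbis Vorbis.Spec Vorbis.Spec.StartDecoder

set_option maxRecDepth 4000
set_option maxHeartbeats 4000000

namespace Vorbis.Spec.start_decoder_C15

/-- `add edx, edx` of `2 · lookup_values`: no overflow below `2^30`. -/
theorem twice32 (LV : Nat) (h : LV < 2 ^ 30) :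
    (Word.ofBV (BitVec.ofNat 32 LV + BitVec.ofNat 32 LV)).toNat % 2 ^ 32 = 2 * LV := by
  rw [Vorbis.toNat_ofBV32, BitVec.toNat_add, BitVec.toNat_ofNat]
  omega

end Vorbis.Spec.start_decoder_C15

/-- Segment C15 of `start_decoder` (0x114dfa … 0x114e18, C line 3947: `skip: setup_temp_free(f, mults, sizeof(mults[0]) *
c->lookup_values)`, then `jmp 114788`): from `AtC15 i` (CUR(i), `CodebookOK c`, temps = [P4]) to `AtC10 i` (temps = []). One check
(load4 `c + 1CH`, inside the codebooks block), one call (the LIFO release of the top temp block), the invariant carried over the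
callee's footprint by `Lemmas.exit_body`. -/
theorem Vorbis.Spec.Worked.start_decoder_C15_ok : Vorbis.Spec.start_decoder_C15.Statement := by
  intro Lay hLay μ hμ u₀ hcode hload4 h_stf g i v hat
  obtain ⟨A, mults, A2, A3, Ai, h⟩ := hat
  -- 1. the entry state's facts
  have he := h.frame.entry
  v_entry he
  have he_room' : 0x700000 + 1888 ≤ (g.e.reg .rsp).toNat := he_room
  have hRA : g.R + 1480 = (g.e.reg .rsp).toNat := h.frame.r_eq.1
  -- 2. the present state: rip, rsp = the steady rsp (spelled from the entry rsp), r14 = c, the code span, DF / MXCSR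
  have w_rip := h.frame.rip
  have c_rsp : v.reg .rsp = g.e.reg .rsp - 1480 := by
    rw [h.frame.rsp]
    exact Vorbis.Spec.start_decoder_C15.addr_of_toNat _ _ (by u_omega)
  obtain ⟨cb, hcb⟩ : ∃ cb : Nat, g.cb v.mem i = cb := ⟨_, rfl⟩
  have c_r14 : v.reg .r14 = addr cb := by
    rw [← hcb]
    exact h.cur.r14
  have w_eq : Mem.EqOn Vorbis.L.textLo Vorbis.L.textHi u₀.mem v.mem := h.frame.code
  have hdf : v.flags .df = false := (show abiInv _ from h.frame.inv).1
  have hmx : v.mxcsr &&& 0x1F80 = 0x1F80 := (show abiInv _ from h.frame.inv).2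
  have hsse := Vorbis.sseOK_of_abiInv h.frame.inv
  -- where `cb(i)` is: inside the codebooks block, a setup block of the arena
  have harena := h.cur.sd.arena
  have hcbok := h.cur.ages.cbOK
  have hcbA : A.1.Blk (codebooksBlock v.mem g.f) := hcbok.F2.mono h.cur.ages.exti
  have hbnd := harena.bounds
  have htxt := h.cur.hand.arenaText
  have hcbin : (codebooksBlock v.mem g.f).base ≤ cb ∧
      cb + 2120 ≤ (codebooksBlock v.mem g.f).base + (codebooksBlock v.mem g.f).size := by
    have hci := hcbok.cb_in i h.cur.lt
    unfold Ghost.cb at hcb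
    rw [hcb] at hci
    simp only [vblock, voff] at hci ⊢
    omega
  have hcbw : 0x119d40 ≤ cb ∧ cb + 2120 ≤ 0xC00000 ∧ (cb + 2120 ≤ 0x700000 ∨ 0x800000 ≤ cb) := by
    have hin := arena_inside harena hcbA
    have hoffs := harena.blk_off_stack hcbA
    simp only [Vorbis.L.textHi] at htxt
    omega
  have hcbn : (addr cb).toNat = cb := toNat_addr cb (by omega)
  -- where `*f` is
  have hfw0 := Vorbis.Spec.start_decoder_C15.f_where h.frame h.cur.hand
  have hfw : (g.e.reg .rsp).toNat + 8 ≤ g.f ∨ g.f + 1808 ≤ 0x700000 ∨ 0x800000 ≤ g.f := hfw0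
  clear hfw0
  have hfi := OB1.inside (Bits.ob1 h.cur.sd.bits) h.cur.sd.env.ok
  -- 3. the loads: `c->lookup_values`, the spills of `mults` and `f`
  obtain ⟨LV, hLV⟩ : ∃ LV : Nat, Codebook.lookup_values v.mem cb = LV := ⟨_, rfl⟩
  have hmu := h.mults
  rw [hcb] at hmu
  have hmt := hmu.temps
  rw [hLV] at hmt
  have hlv := hmu.lv_lt
  rw [hLV] at hlv
  have r28 : v.mem.readLE (addr cb + 28) 4 = LV := by
    rw [← hLV]
    simp only [vfield, vacc, voff]
  have s28 : v.mem.readLE (g.e.reg .rsp - 1440) 8 = mults := by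
    have := hmu.slot
    rw [Mem.u64, Vorbis.Spec.start_decoder_C15.addr_of_toNat (g.e.reg .rsp - 1440) (g.R + 0x28) (by u_omega)] at this
    exact this
  have s18 : v.mem.readLE (g.e.reg .rsp - 1456) 8 = g.f := by
    have := h.cur.slot_f
    rw [Mem.u64, Vorbis.Spec.start_decoder_C15.addr_of_toNat (g.e.reg .rsp - 1456) (g.R + 0x18) (by u_omega)] at this
    exact this
  -- the temp block P4 is the top (and only) temp block
  have htemps : A.1.temps = [(mults - A.1.B, 2 * LV)] := hmt.1
  have hmB : A.1.B ≤ mults := hmt.2 (mults, 2 * LV) List.mem_cons_self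
  obtain ⟨hT, hTL⟩ := harena.top_eq_T htemps
  have hstf := h_stf A.2 g.frames' A.1 (2 * LV) []
  -- 4. the walk: the check, the load, the call
  u_walk hcode [hμ.vendor] until [Vorbis.L.start_decoder.cut120] span [Vorbis.L.textLo, Vorbis.L.textHi] side (v_side)
  · -- 0x114dfe, C line 3947: the check of `c->lookup_values`: inside the codebooks block
    have hun : ShadowUntouched v.mem s_114dfe.mem := by v_untouched
    have hs : Site (Live (stackObjs g.frames' ++ A.2)) (cb + 28) 4 :=
      Site.of_blk h.cur.sd.env.live (up g A _ hcbA) (by omega) (by omega) (by omega)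
    exact Vorbis.Spec.check_site h.frame.shadow hun hs (by u_omega)
  · v_inv
  · -- the precondition of setup_temp_free: the LIFO release of P4
    have hun : ShadowUntouched v.mem s_114e13.mem := by v_untouched
    have hrsp8 : (s_114e13.reg .rsp).toNat + 8 = g.R := by
      rw [w_rsp]
      u_omega
    have hrdi : (s_114e13.reg .rdi).toNat = g.f := by
      rw [w_rdi]
      exact toNat_addr g.f (by omega)
    refine ⟨⟨⟨?_, h.frame.offText⟩, ?_, ?_, htxt⟩, Or.inr ⟨?_, ?_, ?_, ?_⟩⟩
    · rw [hrsp8]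
      exact h.frame.shadow.untouched hun
    · rw [hrdi]
      exact h.cur.sd.env.live _ (Bits.OB1 h.cur.sd.bits)
    · rw [hrdi, w_mem]
      apply harena.frame (by simp only [voff]; omega)
      simp only [voff]
      have e : g.f + 132 + 4 = g.f + 112 + 24 := by omega
      rw [e]
      apply Mem.eqOn_writeLE
      · u_omega
      · u_omega
    · rw [htemps, hT]
    · rw [w_rsi]
      show (addr mults).toNat = _
      rw [toNat_addr mults (by omega)]
      omega
    · rw [w_rdx, Vorbis.Spec.start_decoder_C15.twice32 LV hlv]
    · -- `*f` (outside the arena's buffer) does not meet the released block and its red zone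
      have htop : A.1.temps = (A.1.T, 2 * LV) :: [] := by
        rw [htemps, hT]
      rw [hrdi]
      exact setup_temp_free.apart_of_out harena htop h.cur.objOut
  · -- after the call: the footprint and the post over the segment's entry state
    v_after_call w_rsp_114e13 w_mem_114e13
    have hrdi : (s_114e13.reg .rdi).toNat = g.f := by
      rw [w_rdi_114e13]
      exact toNat_addr g.f (by omega)
    have hrsi : (s_114e13.reg .rsi).toNat = mults := by
      rw [w_rsi_114e13]
      exact toNat_addr mults (by omega)
    have hrdx : (s_114e13.reg .rdx).toNat % 2 ^ 32 = 2 * LV := by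
      rw [w_rdx_114e13]
      exact Vorbis.Spec.start_decoder_C15.twice32 LV hlv
    have hsp1 : (g.e.reg .rsp - 1488).toNat = g.R - 8 := by u_omega
    have hrsp8 : (s_114e13.reg .rsp).toNat + 8 = g.R := by
      rw [w_rsp_114e13, hsp1]
      omega
    rw [hrdi, hrsi, hrdx, hsp1] at w_same
    have hr8 := le_r8 (2 * LV)
    -- the segment's footprint: 56 bytes of stack, `temp_offset`, the shadow of the released block
    have hsame : Mem.SameExcept [⟨g.R - 56, g.R⟩, ⟨g.f + 132, g.f + 136⟩, shadowSpan mults (mults + r8 (2 * LV))] v.mem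
        s_114e13r.mem := by
      apply Mem.SameExcept.trans (ν := v.mem.writeLE (g.e.reg .rsp - 1488) 8 1134104)
      · apply Mem.SameExcept.writeLE
        · rw [hsp1]
          omega
        · refine ⟨⟨g.R - 56, g.R⟩, List.mem_cons_self, ?_, ?_⟩
          · rw [hsp1]
            simp only
            omega
          · rw [hsp1]
            simp only
            omega
      · apply w_same.mono
        intro w hw a h1 h2
        simp only [List.mem_cons, List.mem_nil_iff, or_false] at hw
        rcases hw with rfl | rfl | rfl
        · refine ⟨⟨g.R - 56, g.R⟩, List.mem_cons_self, ?_, ?_⟩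
          · simp only at h1 ⊢
            omega
          · simp only at h2 ⊢
            omega
        · exact ⟨_, List.mem_cons_of_mem _ List.mem_cons_self, h1, h2⟩
        · exact ⟨_, List.mem_cons_of_mem _ (List.mem_cons_of_mem _ List.mem_cons_self), h1, h2⟩
    -- the callee's post: the arena layer and the shadow layer without P4
    have hne : s_114e13.reg .rsi ≠ 0 := by
      intro e
      rw [e] at hrsi
      have e0 : (0 : Word).toNat = 0 := rfl
      simp only [Vorbis.L.textHi] at htxt
      omega
    obtain ⟨hA', hS'⟩ := w_post.2 hne
    rw [hrdi, hrdx] at hA'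
    rw [hrsp8] at hS'
    have hr14 : s_114e13r.reg .r14 = v.reg .r14 := w_kept.get .r14 rfl
    clear w_same w_post
    -- 0x114e18: `jmp 114788`
    u_walk hcode [hμ.vendor] until [Vorbis.L.start_decoder.cut120] span [Vorbis.L.textLo, Vorbis.L.textHi] side (v_side)
    -- 5. the exit 0x114788: `AtC10 i` for the arena without P4 (Lemmas.exit_body)
    refine ReachVia.done ?_
    refine ⟨(A.1.withTemp (A.1.T + r8 (2 * LV) + 32) [], dropObjs [A.1.tempObj (A.1.T, 2 * LV)] A.2), ?_⟩
    apply Vorbis.Spec.start_decoder_C15.exit_body h (A.1.T + r8 (2 * LV) + 32) (r8 (2 * LV)) (A.1.tempObj (A.1.T, 2 * LV))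
    · unfold Arena.tempObj
      simp only
      omega
    · rfl
    · omega
    · exact w_rip
    · rw [w_rsp, ← c_rsp]
      exact h.frame.rsp
    · refine Vorbis.abiInv_of ?_ ?_
      · rw [w_flags]
        exact w_df
      · rw [w_mxcsr]
        exact w_mx
    · exact w_eq
    · rw [w_mem]
      exact hsame
    · rw [w_mem]
      exact hA'
    · rw [w_mem]
      exact hS'
    · exact w_kept.get .r14 rfl
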